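-- pv_equiv track=rewrite | github.com/simokettunen/tiralabra-regex | src/algorithms/rabin_scott.py | bit_string
-- ===== SOURCE A (Python) =====
-- def bit_string(integers, n):
--     """Calculates a bit string of the given set of integers.
--
--     Args:
--         integers (set): set of integers
--         n: maximum length of bit string
--
--     Returns:
--         Bit string, where bit at position i has value 0 if i is not in the given set of integers,
--         and value 1 if i is in the given set opf integers.
--
--     """
--
--     string = ''
--
--     for i in range(1, n+1):
--         if i in integers:
--             string += '1'
--         else:
--             string += '0'
--
--     return string
-- ===== SOURCE B (Python) =====
-- def bit_string(integers, n):
--     buf = ['0'] * max(n, 0)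
--     for v in integers:
--         if 1 <= v <= n:
--             buf[v - 1] = '1'
--     return ''.join(buf)
-- ===== Notes on version B (the rewrite author's own statement) =====
-- stated objective: faster
-- what changed: Instead of scanning positions 1..n and testing membership in the list for each (O(n*m)), B allocates a zero buffer of length n and does one scatter pass over the members, setting slot v-1 for each in-range v, then joins.
import Mathlib
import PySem

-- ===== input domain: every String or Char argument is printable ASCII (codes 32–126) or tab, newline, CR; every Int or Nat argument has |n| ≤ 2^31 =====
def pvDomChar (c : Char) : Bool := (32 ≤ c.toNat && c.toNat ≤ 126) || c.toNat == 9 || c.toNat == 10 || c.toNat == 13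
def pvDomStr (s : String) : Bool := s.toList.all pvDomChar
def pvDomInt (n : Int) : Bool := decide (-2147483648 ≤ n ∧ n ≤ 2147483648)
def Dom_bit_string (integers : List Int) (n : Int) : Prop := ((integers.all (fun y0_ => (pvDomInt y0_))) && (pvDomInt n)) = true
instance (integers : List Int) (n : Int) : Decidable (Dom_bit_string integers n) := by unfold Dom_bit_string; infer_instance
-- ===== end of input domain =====

-- B replaces A's per-position membership scan by a single scatter pass over the members
-- into a preallocated '0' buffer (objective: faster).

-- ===== PORT A =====
def bit_string (integers : List Int) (n : Int) : String :=
  (PySem.List.pyRange 1 (n+1) 1).foldl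
    (fun s i => s ++ (if integers.contains i then "1" else "0")) ""

-- ===== PORT B =====
def bit_string_alt (integers : List Int) (n : Int) : String :=
  let buf : List Char := List.replicate (max n 0).toNat '0'
  let buf := integers.foldl
    (fun b v => if 1 ≤ v ∧ v ≤ n then b.set (v-1).toNat '1' else b) buf
  String.ofList buf

-- ===== PRECONDITION & SPEC =====
def Spec_bit_string (integers : List Int) (n : Int) (out : String) : Prop := out = bit_string_alt integers n
instance (integers : List Int) (n : Int) (out : String) : Decidable (Spec_bit_string integers n out) := by unfold Spec_bit_string; infer_instance

-- ===== CLAIM (what is proved, stated in full; the proofs are below) =====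
def Claim_equal_bit_string : Prop := ∀ (integers : List Int) (n : Int), Dom_bit_string integers n → Spec_bit_string integers n (bit_string integers n)

-- ===== LEMMAS AND PROOFS =====

-- A's accumulator string, as a char list: fold of one-char appends = map.
theorem pvA_toList (L : List Int) (c : Int → Bool) (s : String) :
    (L.foldl (fun s i => s ++ (if c i then "1" else "0")) s).toList
      = s.toList ++ L.map (fun i => if c i then '1' else '0') := by
  induction L generalizing s with
  | nil => simp
  | cons a t ih =>
    simp only [List.foldl_cons, List.map_cons, ih]
    by_cases h : c a <;> simp [h]

theorem pvSet_getD (l : List Char) (i : Nat) (a : Char) (j : Nat) :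
    (l.set i a).getD j 'x' = if i = j ∧ j < l.length then a else l.getD j 'x' := by
  simp [List.getD, List.getElem?_set]
  split_ifs with h1 h2 h3 <;> simp_all

theorem pvScatter_len (L : List Int) (n : Int) (buf : List Char) :
    (L.foldl (fun b v => if 1 ≤ v ∧ v ≤ n then b.set (v-1).toNat '1' else b) buf).length
      = buf.length := by
  induction L generalizing buf with
  | nil => rfl
  | cons a t ih =>
    simp only [List.foldl_cons]
    by_cases h : 1 ≤ a ∧ a ≤ n
    · rw [if_pos h, ih]; simp
    · rw [if_neg h, ih]

theorem pvScatter_getD (L : List Int) (n : Int) (buf : List Char) (j : Nat)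
    (hj : j < buf.length) :
    (L.foldl (fun b v => if 1 ≤ v ∧ v ≤ n then b.set (v-1).toNat '1' else b) buf).getD j 'x'
      = if L.any (fun v => decide (1 ≤ v ∧ v ≤ n) && ((v-1).toNat == j))
        then '1' else buf.getD j 'x' := by
  induction L generalizing buf with
  | nil => simp
  | cons a t ih =>
    simp only [List.foldl_cons, List.any_cons]
    by_cases h : 1 ≤ a ∧ a ≤ n
    · rw [if_pos h, ih (buf.set (a-1).toNat '1') (by simpa using hj)]
      rw [pvSet_getD]
      by_cases hidx : (a-1).toNat = j
      · by_cases hany : (t.any (fun v => decide (1 ≤ v ∧ v ≤ n) && ((v-1).toNat == j))) = true <;>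
          simp [h, hidx, hj]
      · have hidx' : ¬(a.toNat - 1 = j) := by omega
        simp [h, hidx']
    · rw [if_neg h, ih buf hj]
      simp [h]

-- ===== VERDICT (by name: the statement is the Claim_ definition above) =====
theorem bit_string_spec : Claim_equal_bit_string := by
  intro integers n _
  show bit_string integers n = bit_string_alt integers n
  unfold bit_string bit_string_alt
  apply String.toList_inj.mp
  rw [pvA_toList, PySem.List.pyRange_one]
  simp only [String.toList_ofList]
  set step := fun (b : List Char) (v : Int) =>
    if 1 ≤ v ∧ v ≤ n then b.set (v-1).toNat '1' else b with hstep
  have hm : (max n 0).toNat = n.toNat := by omega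
  have hm' : ((n : Int) + 1 - 1).toNat = n.toNat := by omega
  have hlen : (integers.foldl step (List.replicate (max n 0).toNat '0')).length = n.toNat := by
    rw [pvScatter_len]; simp [hm]
  apply List.ext_getElem
  · simp [hlen]
  · intro j h1 h2
    have hj : j < n.toNat := by simpa [hlen] using h2
    have hgd : (integers.foldl step (List.replicate (max n 0).toNat '0'))[j]
        = (integers.foldl step (List.replicate (max n 0).toNat '0')).getD j 'x' := by
      simp [List.getD, List.getElem?_eq_getElem h2]
    rw [hgd, pvScatter_getD integers n _ j (by simp [hm, hj])]
    have hbase : (List.replicate (max n 0).toNat '0').getD j 'x' = '0' := by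
      simp [List.getD, hm, hj]
    rw [hbase]
    have hmem : (integers.any fun v => decide (1 ≤ v ∧ v ≤ n) && ((v-1).toNat == j))
        = integers.contains (1 + (j : Int)) := by
      rcases Bool.eq_false_or_eq_true (integers.contains (1 + (j : Int))) with hc | hc
      case inr =>
        rw [hc]
        simp only [List.any_eq_false]
        intro v hv
        simp only [Bool.and_eq_true, decide_eq_true_eq, beq_iff_eq, not_and]
        intro hrange hidx
        have hvj : v = 1 + (j : Int) := by omega
        simp only [List.contains_eq_mem, decide_eq_false_iff_not] at hc
        exact hc (hvj ▸ hv)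
      case inl =>
        rw [hc]
        simp only [List.any_eq_true]
        refine ⟨1 + (j : Int), by simpa using hc, ?_⟩
        simp only [Bool.and_eq_true, decide_eq_true_eq, beq_iff_eq]
        refine ⟨⟨by omega, by omega⟩, by omega⟩
    rw [hmem]
    simp only [hm']
    by_cases hc : integers.contains (1 + (j : Int)) <;> simp
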